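-- pv_equiv track=rewrite | github.com/capbloo/csc316-a3 | build_real_data.py | compute_pairwise
-- ===== SOURCE A (Python) =====
-- def compute_pairwise(ballots):
--     candidates = sorted({cand for b in ballots for cand in b})
--     if len(candidates) < 2:
--         return candidates, {}
--
--     pair = {a: {b: 0 for b in candidates if b != a} for a in candidates}
--
--     for ballot in ballots:
--         pos = {cand: idx for idx, cand in enumerate(ballot)}
--         ranked = set(pos.keys())
--         for a in candidates:
--             for b in candidates:
--                 if a == b:
--                     continue
--                 a_in = a in ranked
--                 b_in = b in ranked
--                 if a_in and b_in:
--                     if pos[a] < pos[b]: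
--                         pair[a][b] += 1
--                 elif a_in and not b_in:
--                     pair[a][b] += 1
--
--     return candidates, pair
-- ===== SOURCE B (Python) =====
-- def compute_pairwise(ballots):
--     candidates = sorted({cand for b in ballots for cand in b})
--     if len(candidates) < 2:
--         return candidates, {}
--
--     # wins(a,b) = (#ballots ranking a) - (#ballots ranking both with b strictly before a),
--     # so it suffices to count appearances and ordered co-ranked pairs, then subtract.
--     ranked_count = {c: 0 for c in candidates}
--     before = {}  # (earlier, later) -> number of ballots ranking both in that order
--     for ballot in ballots:
--         pos = {}
--         for idx, cand in enumerate(ballot):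
--             pos[cand] = idx
--         rest = sorted(pos, key=pos.get)
--         while rest:
--             a, rest = rest[0], rest[1:]
--             ranked_count[a] += 1
--             for b in rest:
--                 before[(a, b)] = before.get((a, b), 0) + 1
--
--     return candidates, {a: {b: ranked_count[a] - before.get((b, a), 0)
--                             for b in candidates if b != a}
--                         for a in candidates}
-- ===== Notes on version B (the rewrite author's own statement) =====
-- stated objective: faster
-- what changed: B replaces A's per-ballot three-way test over all C^2 candidate pairs by the identity wins(a,b) = (#ballots ranking a) - (#ballots ranking both with b before a): per ballot it only tallies appearance counts and ordered co-ranked pairs (candidates sorted by position), and the nested result table is read off by one subtraction per cell at the end; unranked candidates are never touched per ballot.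
import Mathlib
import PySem

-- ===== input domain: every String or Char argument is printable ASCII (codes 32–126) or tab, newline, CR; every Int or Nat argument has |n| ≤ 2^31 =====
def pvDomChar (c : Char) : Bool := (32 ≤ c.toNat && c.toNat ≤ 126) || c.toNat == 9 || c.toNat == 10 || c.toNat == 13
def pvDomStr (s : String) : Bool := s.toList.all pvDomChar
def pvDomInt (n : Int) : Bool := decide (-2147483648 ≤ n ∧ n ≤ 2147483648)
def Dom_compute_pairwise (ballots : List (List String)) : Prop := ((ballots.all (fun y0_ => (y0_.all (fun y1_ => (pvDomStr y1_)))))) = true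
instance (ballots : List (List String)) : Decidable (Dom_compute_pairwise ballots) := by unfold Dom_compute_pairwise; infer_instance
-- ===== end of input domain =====

-- B replaces A's per-ballot test over all C² candidate pairs by the identity
-- wins(a,b) = (#ballots ranking a) − (#ballots ranking both with b before a): per ballot it only
-- tallies appearance counts and ordered co-ranked pairs and subtracts once per cell at the end
-- (objective: faster — per-ballot work drops from C² to k², k the ballot length).

-- ===== PORT A =====

-- pair[a][b] += 1  (a and b are always keys of their dicts, so modify's defaults are never used)
def pvIncr (pr : PySem.Dict String (PySem.Dict String Int)) (a b : String) :
    PySem.Dict String (PySem.Dict String Int) :=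
  pr.modify a PySem.Dict.empty (fun inn => inn.modify b 0 (· + 1))

-- pos = {cand: idx for idx, cand in enumerate(ballot)}
def pvPos (ballot : List String) : PySem.Dict String Int :=
  (PySem.List.enumerate ballot).foldl (fun d ic => d.insert ic.2 ic.1) PySem.Dict.empty

-- {a: {b: g(a,b) for b in candidates if b != a} for a in candidates}
def pvTable (cs : List String) (g : String → String → Int) :
    PySem.Dict String (PySem.Dict String Int) :=
  cs.foldl
    (fun d a => d.insert a
      (cs.foldl (fun di b => if b ≠ a then di.insert b (g a b) else di) PySem.Dict.empty))
    PySem.Dict.empty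

-- the body of A's  'for ballot in ballots:'  loop
-- (ranked = set(pos.keys()); 'a in ranked' is exactly pos.contains a)
def pvBallotStep (cs : List String) (pr : PySem.Dict String (PySem.Dict String Int))
    (ballot : List String) : PySem.Dict String (PySem.Dict String Int) :=
  let pos := pvPos ballot
  cs.foldl
    (fun pr a =>
      cs.foldl
        (fun pr b =>
          if a = b then pr
          else
            let a_in := pos.contains a
            let b_in := pos.contains b
            if a_in && b_in then
              if pos.getD a 0 < pos.getD b 0 then pvIncr pr a b else pr
            else if a_in && !b_in then pvIncr pr a b
            else pr)
        pr)
    pr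

def compute_pairwise (ballots : List (List String)) :
    List String × (List (String × List (String × Int))) :=
  let candidates := PySem.List.sorted (PySem.Set.ofList (ballots.flatMap (fun b => b))) (fun c => c)
  if candidates.length < 2 then (candidates, [])
  else
    (candidates,
      (ballots.foldl (pvBallotStep candidates) (pvTable candidates (fun _ _ => 0))).items.map
        (fun p => (p.1, p.2.items)))

-- ===== PORT B =====

-- B's  'while rest:'  loop: pop the front-ranked candidate, count its appearance, and count it
-- 'before' every later-ranked candidate of the same ballot
def pvSeqStep (rest : List String) (R : PySem.Dict String Int)
    (W : PySem.Dict (String × String) Int) :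
    PySem.Dict String Int × PySem.Dict (String × String) Int :=
  match rest with
  | [] => (R, W)
  | a :: rest =>
    -- ranked_count[a] += 1  (a is always a key of ranked_count, so modify's default is never used)
    let R := R.modify a 0 (· + 1)
    let W := rest.foldl (fun W b => W.insert (a, b) (W.getD (a, b) 0 + 1)) W
    pvSeqStep rest R W

def compute_pairwise_alt (ballots : List (List String)) :
    List String × (List (String × List (String × Int))) :=
  let candidates := PySem.List.sorted (PySem.Set.ofList (ballots.flatMap (fun b => b))) (fun c => c)
  if candidates.length < 2 then (candidates, [])
  else
    let R0 := candidates.foldl (fun d c => d.insert c (0 : Int)) PySem.Dict.empty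
    let RW := ballots.foldl
      (fun RW ballot =>
        let pos := pvPos ballot
        pvSeqStep (PySem.List.sorted pos.keys (fun c => pos.getD c 0)) RW.1 RW.2)
      (R0, PySem.Dict.empty)
    (candidates,
      (pvTable candidates (fun a b => RW.1.getD a 0 - RW.2.getD (b, a) 0)).items.map
        (fun p => (p.1, p.2.items)))

-- ===== PRECONDITION & SPEC =====
def Spec_compute_pairwise (ballots : List (List String)) (out : List String × (List (String × List (String × Int)))) : Prop := out = compute_pairwise_alt ballots
instance (ballots : List (List String)) (out : List String × (List (String × List (String × Int)))) : Decidable (Spec_compute_pairwise ballots out) := by unfold Spec_compute_pairwise; infer_instance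

-- ===== CLAIM (what is proved, stated in full; the proofs are below) =====
def Claim_equal_compute_pairwise : Prop := ∀ (ballots : List (List String)), Dom_compute_pairwise ballots → Spec_compute_pairwise ballots (compute_pairwise ballots)

-- ===== LEMMAS AND PROOFS =====

-- canonical shape of the nested pair dict: one row per candidate, inner keys the other candidates
def pvInner (cs : List String) (f : String → String → Int) (a : String) : PySem.Dict String Int :=
  PySem.Dict.mk ((cs.filter (fun b => b ≠ a)).map (fun b => (b, f a b)))

def pvCanon (cs : List String) (f : String → String → Int) :
    PySem.Dict String (PySem.Dict String Int) :=
  PySem.Dict.mk (cs.map (fun a => (a, pvInner cs f a)))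

-- the per-ballot score of the ordered pair (a, b), exactly A's branch conditions
def pvScore (pos : PySem.Dict String Int) (a b : String) : Int :=
  if pos.contains a then
    if pos.contains b then (if pos.getD a 0 < pos.getD b 0 then 1 else 0) else 1
  else 0

def pvTally (bs : List (List String)) (x y : String) : Int :=
  (bs.map (fun bl => pvScore (pvPos bl) x y)).sum

-- B's two counters, as sums over ballots
def pvR (bs : List (List String)) (x : String) : Int :=
  (bs.map (fun bl => if (pvPos bl).contains x then (1 : Int) else 0)).sum

def pvW (bs : List (List String)) (x y : String) : Int :=
  (bs.map (fun bl =>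
    if (pvPos bl).contains x ∧ (pvPos bl).contains y ∧ (pvPos bl).getD x 0 < (pvPos bl).getD y 0
    then (1 : Int) else 0)).sum

theorem pvCanon_keys (cs : List String) (f : String → String → Int) :
    (pvCanon cs f).keys = cs := by
  simp [pvCanon, PySem.Dict.keys, Function.comp_def]

theorem pvInner_keys (cs : List String) (f : String → String → Int) (a : String) :
    (pvInner cs f a).keys = cs.filter (fun b => b ≠ a) := by
  simp [pvInner, PySem.Dict.keys, Function.comp_def]

theorem pvCanon_getD (cs : List String) (hnd : cs.Nodup) (f : String → String → Int)
    {a : String} (ha : a ∈ cs) (d0 : PySem.Dict String Int) :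
    (pvCanon cs f).getD a d0 = pvInner cs f a := by
  refine PySem.Dict.getD_of_mem_items _ ?_ ?_ d0
  · exact List.mem_map.2 ⟨a, ha, rfl⟩
  · rw [pvCanon_keys]; exact hnd

theorem pvInner_getD (cs : List String) (hnd : cs.Nodup) (f : String → String → Int)
    {a b : String} (hb : b ∈ cs) (hba : b ≠ a) (d0 : Int) :
    (pvInner cs f a).getD b d0 = f a b := by
  refine PySem.Dict.getD_of_mem_items _ ?_ ?_ d0
  · exact List.mem_map.2 ⟨b, List.mem_filter.2 ⟨hb, by simpa using hba⟩, rfl⟩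
  · rw [pvInner_keys]; exact hnd.filter _

theorem pvCanon_funext (cs : List String) {f g : String → String → Int}
    (h : ∀ x y, f x y = g x y) : pvCanon cs f = pvCanon cs g := by
  have : f = g := funext fun x => funext fun y => h x y
  rw [this]

theorem pvCanon_congr (cs : List String) (f g : String → String → Int)
    (h : ∀ a ∈ cs, ∀ b ∈ cs, b ≠ a → f a b = g a b) : pvCanon cs f = pvCanon cs g := by
  unfold pvCanon pvInner
  refine congrArg _ (List.map_congr_left (fun a ha => ?_))
  refine congrArg _ (congrArg _ (List.map_congr_left (fun b hb => ?_)))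
  have := List.mem_filter.1 hb
  rw [h a ha b this.1 (by simpa using this.2)]

-- a dict comprehension {b: g b for b in cs if p b} as a literal dict
theorem pvCompr {ν : Type} (cs : List String) (hnd : cs.Nodup) (p : String → Prop)
    [DecidablePred p] (g : String → ν) :
    cs.foldl (fun d b => if p b then d.insert b (g b) else d) PySem.Dict.empty
      = PySem.Dict.mk ((cs.filter (fun b => p b)).map (fun b => (b, g b))) := by
  have h1 : (cs.filter (fun b => p b)).foldl (fun d b => d.insert b (g b)) PySem.Dict.empty
      = cs.foldl (fun d b => if p b then d.insert b (g b) else d) PySem.Dict.empty := by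
    rw [List.foldl_filter]
    simp only [decide_eq_true_eq]
  rw [← h1]
  have h2 := PySem.Dict.items_foldl_insert_fresh (l := cs.filter (fun b => p b))
    (k := fun b => b) (v := g) PySem.Dict.empty (by simp [PySem.Dict.empty])
    (by simpa using (hnd.filter _))
  apply PySem.Dict.ext
  simpa [PySem.Dict.empty] using h2

theorem pvTable_canon (cs : List String) (hnd : cs.Nodup) (g : String → String → Int) :
    pvTable cs g = pvCanon cs g := by
  unfold pvTable
  have hinner : ∀ a : String,
      cs.foldl (fun di b => if b ≠ a then di.insert b (g a b) else di) PySem.Dict.empty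
        = pvInner cs g a :=
    fun a => pvCompr cs hnd (fun b => b ≠ a) (fun b => g a b)
  simp only [hinner]
  have h2 := PySem.Dict.items_foldl_insert_fresh (l := cs)
    (k := fun a => a) (v := fun a => pvInner cs g a) PySem.Dict.empty
    (by simp [PySem.Dict.empty]) (by simpa using hnd)
  apply PySem.Dict.ext
  simpa [pvCanon, PySem.Dict.empty] using h2

theorem pvIncr_canon (cs : List String) (hnd : cs.Nodup) (f : String → String → Int)
    {a b : String} (ha : a ∈ cs) (hb : b ∈ cs) (hba : b ≠ a) :
    pvIncr (pvCanon cs f) a b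
      = pvCanon cs (fun x y => if x = a ∧ y = b then f x y + 1 else f x y) := by
  unfold pvIncr PySem.Dict.modify
  beta_reduce
  rw [pvCanon_getD cs hnd f ha, pvInner_getD cs hnd f hb hba]
  have hcontb : (pvInner cs f a).contains b = true := by
    rw [PySem.Dict.contains_iff_mem_keys, pvInner_keys]
    exact List.mem_filter.2 ⟨hb, by simpa using hba⟩
  have hinner : (pvInner cs f a).insert b (f a b + 1)
      = pvInner cs (fun x y => if x = a ∧ y = b then f x y + 1 else f x y) a := by
    apply PySem.Dict.ext
    rw [PySem.Dict.items_insert_of_contains _ _ hcontb]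
    show ((cs.filter (fun y => y ≠ a)).map (fun y => (y, f a y))).map _
        = (cs.filter (fun y => y ≠ a)).map _
    rw [List.map_map]
    refine List.map_congr_left (fun y hy => ?_)
    by_cases hyb : y = b
    · subst hyb; simp
    · simp [Function.comp, hyb]
  rw [hinner]
  have hconta : (pvCanon cs f).contains a = true := by
    rw [PySem.Dict.contains_iff_mem_keys, pvCanon_keys]; exact ha
  apply PySem.Dict.ext
  rw [PySem.Dict.items_insert_of_contains _ _ hconta]
  show ((cs.map (fun x => (x, pvInner cs f x))).map _) = cs.map _
  rw [List.map_map]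
  refine List.map_congr_left (fun x hx => ?_)
  by_cases hxa : x = a
  · subst hxa; simp
  · simp only [Function.comp, beq_iff_eq, hxa, if_false]
    have : pvInner cs f x
        = pvInner cs (fun x y => if x = a ∧ y = b then f x y + 1 else f x y) x := by
      unfold pvInner
      refine congrArg _ (List.map_congr_left (fun y _ => ?_))
      simp [hxa]
    rw [this]

-- one step of A's inner loop on a canonical dict
theorem pvA_step (cs : List String) (hnd : cs.Nodup) (pos : PySem.Dict String Int)
    (f : String → String → Int) {a b : String} (ha : a ∈ cs) (hb : b ∈ cs) :
    (if a = b then pvCanon cs f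
     else
       let a_in := pos.contains a
       let b_in := pos.contains b
       if a_in && b_in then
         if pos.getD a 0 < pos.getD b 0 then pvIncr (pvCanon cs f) a b else pvCanon cs f
       else if a_in && !b_in then pvIncr (pvCanon cs f) a b
       else pvCanon cs f)
      = pvCanon cs (fun x y => if x = a ∧ y = b ∧ b ≠ a then f x y + pvScore pos a b else f x y) := by
  by_cases hab : a = b
  · simp only [hab]
    refine pvCanon_funext cs (fun x y => ?_)
    by_cases h : x = b ∧ y = b ∧ b ≠ b
    · exact absurd rfl h.2.2
    · rw [if_neg h]
  · rw [if_neg hab]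
    have hba : b ≠ a := fun h => hab h.symm
    by_cases hain : pos.contains a
    · by_cases hbin : pos.contains b
      · simp only [hain, hbin, Bool.and_self, Bool.not_true, Bool.and_false]
        by_cases hlt : pos.getD a 0 < pos.getD b 0
        · rw [if_pos hlt, pvIncr_canon cs hnd f ha hb hba]
          refine pvCanon_funext cs (fun x y => ?_)
          by_cases h : x = a ∧ y = b
          · rw [if_pos h, if_pos ⟨h.1, h.2, hba⟩]
            simp [pvScore, hain, hbin, hlt]
          · rw [if_neg h, if_neg (fun hc => h ⟨hc.1, hc.2.1⟩)]
        · rw [if_neg hlt]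
          refine pvCanon_funext cs (fun x y => ?_)
          by_cases h : x = a ∧ y = b ∧ b ≠ a
          · rw [if_pos h]
            simp [pvScore, hain, hbin, hlt]
          · rw [if_neg h]
      · simp only [hain, Bool.true_and, hbin]
        simp only [Bool.false_eq_true, if_false, Bool.not_false]
        rw [pvIncr_canon cs hnd f ha hb hba]
        refine pvCanon_funext cs (fun x y => ?_)
        by_cases h : x = a ∧ y = b
        · rw [if_pos h, if_pos ⟨h.1, h.2, hba⟩]
          simp [pvScore, hain, hbin]
        · rw [if_neg h, if_neg (fun hc => h ⟨hc.1, hc.2.1⟩)]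
    · simp only [hain]
      simp only [Bool.false_eq_true, Bool.false_and, if_false]
      refine pvCanon_funext cs (fun x y => ?_)
      by_cases h : x = a ∧ y = b ∧ b ≠ a
      · rw [if_pos h]
        simp [pvScore, hain]
      · rw [if_neg h]

theorem pvA_inner (cs : List String) (hnd : cs.Nodup) (pos : PySem.Dict String Int)
    {a : String} (ha : a ∈ cs) :
    ∀ (l : List String), (∀ y ∈ l, y ∈ cs) → l.Nodup → ∀ f,
    l.foldl (fun pr b =>
        if a = b then pr
        else
          let a_in := pos.contains a
          let b_in := pos.contains b
          if a_in && b_in then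
            if pos.getD a 0 < pos.getD b 0 then pvIncr pr a b else pr
          else if a_in && !b_in then pvIncr pr a b
          else pr) (pvCanon cs f)
      = pvCanon cs (fun x y => if x = a ∧ y ∈ l ∧ y ≠ a then f x y + pvScore pos a y else f x y) := by
  intro l
  induction l with
  | nil =>
    intro _ _ f
    rw [List.foldl_nil]
    refine pvCanon_funext cs (fun x y => ?_)
    rw [if_neg (fun h => (List.not_mem_nil (a := y)) h.2.1)]
  | cons b l ih =>
    intro hl hndl f
    rw [List.foldl_cons]
    rw [pvA_step cs hnd pos f ha (hl b List.mem_cons_self)]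
    rw [ih (fun y hy => hl y (List.mem_cons_of_mem _ hy)) hndl.of_cons _]
    have hbl : b ∉ l := (List.nodup_cons.1 hndl).1
    refine pvCanon_funext cs (fun x y => ?_)
    by_cases hxa : x = a
    · by_cases hyb : y = b
      · have c2 : ¬(x = a ∧ y ∈ l ∧ y ≠ a) := fun h => hbl (hyb ▸ h.2.1)
        by_cases hba : b = a
        · have c1 : ¬(x = a ∧ y = b ∧ b ≠ a) := fun h => h.2.2 hba
          have c3 : ¬(x = a ∧ y ∈ b :: l ∧ y ≠ a) := fun h => h.2.2 (hyb.trans hba)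
          rw [if_neg c2, if_neg c1, if_neg c3]
        · rw [if_neg c2, if_pos ⟨hxa, hyb, hba⟩,
            if_pos ⟨hxa, List.mem_cons.2 (Or.inl hyb), hyb ▸ hba⟩, hyb]
      · have c1 : ¬(x = a ∧ y = b ∧ b ≠ a) := fun h => hyb h.2.1
        rw [if_neg c1]
        by_cases h2 : y ∈ l ∧ y ≠ a
        · rw [if_pos ⟨hxa, h2.1, h2.2⟩, if_pos ⟨hxa, List.mem_cons_of_mem _ h2.1, h2.2⟩]
        · rw [if_neg (fun h => h2 ⟨h.2.1, h.2.2⟩),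
            if_neg (fun h => h2 ⟨(List.mem_cons.1 h.2.1).resolve_left hyb, h.2.2⟩)]
    · rw [if_neg (fun h => hxa h.1), if_neg (fun h => hxa h.1), if_neg (fun h => hxa h.1)]

theorem pvA_outer (cs : List String) (hnd : cs.Nodup) (pos : PySem.Dict String Int) :
    ∀ (l : List String), (∀ x ∈ l, x ∈ cs) → l.Nodup → ∀ f,
    l.foldl (fun pr a =>
        cs.foldl (fun pr b =>
          if a = b then pr
          else
            let a_in := pos.contains a
            let b_in := pos.contains b
            if a_in && b_in then
              if pos.getD a 0 < pos.getD b 0 then pvIncr pr a b else pr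
            else if a_in && !b_in then pvIncr pr a b
            else pr) pr) (pvCanon cs f)
      = pvCanon cs (fun x y => if x ∈ l ∧ y ∈ cs ∧ y ≠ x then f x y + pvScore pos x y else f x y) := by
  intro l
  induction l with
  | nil =>
    intro _ _ f
    rw [List.foldl_nil]
    refine pvCanon_funext cs (fun x y => ?_)
    rw [if_neg (fun h => (List.not_mem_nil (a := x)) h.1)]
  | cons a l ih =>
    intro hl hndl f
    have hal : a ∉ l := (List.nodup_cons.1 hndl).1
    rw [List.foldl_cons]
    rw [pvA_inner cs hnd pos (hl a List.mem_cons_self) cs (fun _ h => h) hnd f]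
    rw [ih (fun x hx => hl x (List.mem_cons_of_mem _ hx)) hndl.of_cons _]
    refine pvCanon_funext cs (fun x y => ?_)
    by_cases hxa : x = a
    · subst hxa
      rw [if_neg (fun h => hal h.1)]
      by_cases hy : y ∈ cs ∧ y ≠ x
      · rw [if_pos ⟨rfl, hy⟩, if_pos ⟨List.mem_cons_self, hy⟩]
      · rw [if_neg (fun h => hy h.2), if_neg (fun h => hy h.2)]
    · rw [if_neg (fun h : x = a ∧ y ∈ cs ∧ y ≠ a => hxa h.1)]
      by_cases hxl : x ∈ l ∧ y ∈ cs ∧ y ≠ x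
      · rw [if_pos hxl, if_pos ⟨List.mem_cons_of_mem _ hxl.1, hxl.2⟩]
      · rw [if_neg hxl,
          if_neg (fun h => hxl ⟨(List.mem_cons.1 h.1).resolve_left hxa, h.2⟩)]

theorem pvA_ballotStep (cs : List String) (hnd : cs.Nodup) (bl : List String)
    (f : String → String → Int) :
    pvBallotStep cs (pvCanon cs f) bl
      = pvCanon cs (fun x y =>
          if x ∈ cs ∧ y ∈ cs ∧ y ≠ x then f x y + pvScore (pvPos bl) x y else f x y) := by
  unfold pvBallotStep
  exact pvA_outer cs hnd (pvPos bl) cs (fun _ h => h) hnd f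

theorem pvA_ballots (cs : List String) (hnd : cs.Nodup) :
    ∀ (bs : List (List String)) (f : String → String → Int),
    bs.foldl (pvBallotStep cs) (pvCanon cs f)
      = pvCanon cs (fun x y =>
          if x ∈ cs ∧ y ∈ cs ∧ y ≠ x then f x y + pvTally bs x y else f x y) := by
  intro bs
  induction bs with
  | nil =>
    intro f
    rw [List.foldl_nil]
    refine pvCanon_funext cs (fun x y => ?_)
    by_cases h : x ∈ cs ∧ y ∈ cs ∧ y ≠ x
    · rw [if_pos h]; simp [pvTally]
    · rw [if_neg h]
  | cons bl bs ih =>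
    intro f
    rw [List.foldl_cons, pvA_ballotStep cs hnd bl f, ih _]
    refine pvCanon_funext cs (fun x y => ?_)
    by_cases h : x ∈ cs ∧ y ∈ cs ∧ y ≠ x
    · rw [if_pos h, if_pos h, if_pos h]
      simp [pvTally]
      ring
    · rw [if_neg h, if_neg h, if_neg h]

theorem pvPos_keys_nodup (bl : List String) : (pvPos bl).keys.Nodup := by
  exact PySem.Dict.nodup_keys_foldl_insert_key (PySem.List.enumerate bl)
    (fun ic => ic.2) (fun _ ic => ic.1) PySem.Dict.empty
    (by simp [PySem.Dict.empty, PySem.Dict.keys])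

-- the inner  'for b in rest:'  counter fold of B
theorem pvB_unr (a x y : String) :
    ∀ (m : List String) (w : PySem.Dict (String × String) Int),
    (m.foldl (fun w b => w.insert (a, b) (w.getD (a, b) 0 + 1)) w).getD (x, y) 0
      = w.getD (x, y) 0 + if x = a then (m.count y : Int) else 0 := by
  intro m
  induction m with
  | nil => intro w; simp
  | cons b m ih =>
    intro w
    rw [List.foldl_cons, ih, PySem.Dict.getD_insert, List.count_cons]
    by_cases hx : x = a
    · by_cases hy : y = b
      · rw [if_pos (by rw [hx, hy]), if_pos hx, if_pos hx,
          if_pos (show (b == y) = true by simp [hy])]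
        rw [hx, hy]; push_cast; ring
      · rw [if_neg (by simp [Prod.ext_iff, hy]), if_pos hx, if_pos hx,
          if_neg (show ¬ (b == y) = true by simp; exact fun h => hy h.symm)]
        push_cast; ring
    · rw [if_neg (by simp [Prod.ext_iff, hx]), if_neg hx, if_neg hx]

-- the position dict is injective on its keys (distinct candidates get distinct indices)
theorem pvInsFold_inj :
    ∀ (l : List (Int × String)), l.Pairwise (fun p q => p.1 < q.1) →
    ∀ (d : PySem.Dict String Int),
      (∀ c, d.contains c = true → ∀ p ∈ l, d.getD c 0 < p.1) →
      (∀ c c', d.contains c = true → d.contains c' = true →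
        d.getD c 0 = d.getD c' 0 → c = c') →
    ∀ c c', (l.foldl (fun d ic => d.insert ic.2 ic.1) d).contains c = true →
      (l.foldl (fun d ic => d.insert ic.2 ic.1) d).contains c' = true →
      (l.foldl (fun d ic => d.insert ic.2 ic.1) d).getD c 0
        = (l.foldl (fun d ic => d.insert ic.2 ic.1) d).getD c' 0 → c = c' := by
  intro l
  induction l with
  | nil => intro _ d _ hinj c c' hc hc' heq; exact hinj c c' hc hc' heq
  | cons p l ih =>
    intro hp d hbd hinj
    rw [List.foldl_cons]
    have hhead : ∀ q ∈ l, p.1 < q.1 := fun q hq => List.rel_of_pairwise_cons hp hq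
    refine ih hp.of_cons (d.insert p.2 p.1) ?_ ?_
    · intro c hc q hq
      rw [PySem.Dict.getD_insert]
      by_cases hcp : c = p.2
      · rw [if_pos hcp]; exact hhead q hq
      · rw [if_neg hcp]
        have : d.contains c = true := by
          rw [PySem.Dict.contains_insert] at hc
          simpa [hcp] using hc
        exact hbd c this q (List.mem_cons_of_mem _ hq)
    · intro c c' hc hc' heq
      rw [PySem.Dict.getD_insert, PySem.Dict.getD_insert] at heq
      by_cases hcp : c = p.2 <;> by_cases hcp' : c' = p.2
      · rw [hcp, hcp']
      · rw [if_pos hcp, if_neg hcp'] at heq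
        have hc'd : d.contains c' = true := by
          rw [PySem.Dict.contains_insert] at hc'
          simpa [hcp'] using hc'
        exact absurd heq.symm (ne_of_lt (hbd c' hc'd p List.mem_cons_self))
      · rw [if_neg hcp, if_pos hcp'] at heq
        have hcd : d.contains c = true := by
          rw [PySem.Dict.contains_insert] at hc
          simpa [hcp] using hc
        exact absurd heq (ne_of_lt (hbd c hcd p List.mem_cons_self))
      · rw [if_neg hcp, if_neg hcp'] at heq
        have hcd : d.contains c = true := by
          rw [PySem.Dict.contains_insert] at hc
          simpa [hcp] using hc
        have hc'd : d.contains c' = true := by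
          rw [PySem.Dict.contains_insert] at hc'
          simpa [hcp'] using hc'
        exact hinj c c' hcd hc'd heq

theorem pvPos_inj (bl : List String) {x y : String}
    (hx : (pvPos bl).contains x = true) (hy : (pvPos bl).contains y = true)
    (heq : (pvPos bl).getD x 0 = (pvPos bl).getD y 0) : x = y := by
  refine pvInsFold_inj (PySem.List.enumerate bl) (PySem.List.pairwise_lt_enumerate bl 0)
    PySem.Dict.empty ?_ ?_ x y hx hy heq
  · intro c hc; rw [PySem.Dict.contains_empty] at hc; exact absurd hc (by simp)
  · intro c c' hc; rw [PySem.Dict.contains_empty] at hc; exact absurd hc (by simp)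

-- B's per-ballot sequence: the ranked candidates in strictly increasing position order
theorem pvSeq_nodup (bl : List String) :
    (PySem.List.sorted (pvPos bl).keys (fun c => (pvPos bl).getD c 0)).Nodup :=
  ((PySem.List.sorted_perm (pvPos bl).keys (fun c => (pvPos bl).getD c 0) false).symm.nodup
    (pvPos_keys_nodup bl))

theorem pvSeq_pairwise (bl : List String) :
    (PySem.List.sorted (pvPos bl).keys (fun c => (pvPos bl).getD c 0)).Pairwise
      (fun a b => (pvPos bl).getD a 0 < (pvPos bl).getD b 0) := by
  have hle := PySem.List.sorted_pairwise (pvPos bl).keys (fun c => (pvPos bl).getD c 0)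
  have hnd := pvSeq_nodup bl
  refine List.Pairwise.imp_of_mem (fun {a b} ha hb h => ?_) (hle.and hnd)
  have hak : (pvPos bl).contains a = true := by
    rw [PySem.Dict.contains_iff_mem_keys]
    exact (PySem.List.mem_sorted _ _ _ _).1 ha
  have hbk : (pvPos bl).contains b = true := by
    rw [PySem.Dict.contains_iff_mem_keys]
    exact (PySem.List.mem_sorted _ _ _ _).1 hb
  exact lt_of_le_of_ne h.1 (fun he => h.2 (pvPos_inj bl hak hbk he))

theorem pvSeq_mem (bl : List String) (x : String) :
    x ∈ PySem.List.sorted (pvPos bl).keys (fun c => (pvPos bl).getD c 0)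
      ↔ (pvPos bl).contains x = true := by
  rw [PySem.List.mem_sorted, PySem.Dict.contains_iff_mem_keys]

-- the appearance-count half of pvSeqStep
theorem pvS1 (x : String) :
    ∀ (rest : List String) (R : PySem.Dict String Int) (W : PySem.Dict (String × String) Int),
    (pvSeqStep rest R W).1.getD x 0 = R.getD x 0 + (rest.count x : Int) := by
  intro rest
  induction rest with
  | nil => intro R W; simp [pvSeqStep]
  | cons a rest ih =>
    intro R W
    rw [pvSeqStep, ih, PySem.Dict.getD_modify, List.count_cons]
    by_cases hx : x = a
    · subst hx
      rw [if_pos rfl, if_pos (by simp)]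
      push_cast; ring
    · rw [if_neg hx, if_neg (by simp; exact fun h => hx h.symm)]
      push_cast; ring

-- the ordered-pair half of pvSeqStep, on a strictly key-increasing sequence
theorem pvS2 (key : String → Int) (x y : String) :
    ∀ (rest : List String), rest.Pairwise (fun a b => key a < key b) →
    ∀ (R : PySem.Dict String Int) (W : PySem.Dict (String × String) Int),
    (pvSeqStep rest R W).2.getD (x, y) 0
      = W.getD (x, y) 0 + (if x ∈ rest ∧ y ∈ rest ∧ key x < key y then 1 else 0) := by
  intro rest
  induction rest with
  | nil =>
    intro _ R W
    rw [pvSeqStep, if_neg (fun h => (List.not_mem_nil (a := x)) h.1)]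
    ring
  | cons a rest ih =>
    intro hp R W
    have hhead : ∀ b ∈ rest, key a < key b := fun b hb => List.rel_of_pairwise_cons hp hb
    have hnd : (a :: rest).Nodup := hp.imp (fun h => ne_of_apply_ne key (ne_of_lt h))
    have har : a ∉ rest := (List.nodup_cons.1 hnd).1
    rw [pvSeqStep, ih hp.of_cons, pvB_unr]
    by_cases hxa : x = a
    · subst hxa
      rw [if_pos rfl, if_neg (fun h => har h.1)]
      by_cases hyr : y ∈ rest
      · rw [List.count_eq_one_of_mem (List.Nodup.of_cons hnd) hyr,
          if_pos ⟨List.mem_cons_self, List.mem_cons_of_mem _ hyr, hhead y hyr⟩]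
        push_cast; ring
      · rw [List.count_eq_zero.2 hyr]
        have : ¬(x ∈ x :: rest ∧ y ∈ x :: rest ∧ key x < key y) := by
          rintro ⟨-, hy, hlt⟩
          rcases List.mem_cons.1 hy with h | h
          · subst h; exact lt_irrefl _ hlt
          · exact hyr h
        rw [if_neg this]
        push_cast; ring
    · rw [if_neg hxa]
      by_cases hc : x ∈ rest ∧ y ∈ rest ∧ key x < key y
      · rw [if_pos hc,
          if_pos ⟨List.mem_cons_of_mem _ hc.1, List.mem_cons_of_mem _ hc.2.1, hc.2.2⟩]
        ring
      · have : ¬(x ∈ a :: rest ∧ y ∈ a :: rest ∧ key x < key y) := by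
          rintro ⟨hx, hy, hlt⟩
          have hxr : x ∈ rest := (List.mem_cons.1 hx).resolve_left hxa
          rcases List.mem_cons.1 hy with h | h
          · subst h; exact absurd hlt (not_lt_of_gt (hhead x hxr))
          · exact hc ⟨hxr, h, hlt⟩
        rw [if_neg hc, if_neg this]
        ring

-- per ballot: B's counters change by exactly the indicator functions of pvR / pvW
theorem pvBallotR (bl : List String) (x : String)
    (R : PySem.Dict String Int) (W : PySem.Dict (String × String) Int) :
    (pvSeqStep (PySem.List.sorted (pvPos bl).keys (fun c => (pvPos bl).getD c 0)) R W).1.getD x 0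
      = R.getD x 0 + (if (pvPos bl).contains x then (1 : Int) else 0) := by
  rw [pvS1]
  have hnd := pvSeq_nodup bl
  by_cases hx : (pvPos bl).contains x
  · rw [if_pos hx, List.count_eq_one_of_mem hnd ((pvSeq_mem bl x).2 hx)]
    norm_num
  · rw [if_neg hx, List.count_eq_zero.2 (fun h => hx ((pvSeq_mem bl x).1 h))]
    norm_num

theorem pvBallotW (bl : List String) (x y : String)
    (R : PySem.Dict String Int) (W : PySem.Dict (String × String) Int) :
    (pvSeqStep (PySem.List.sorted (pvPos bl).keys (fun c => (pvPos bl).getD c 0)) R W).2.getD (x, y) 0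
      = W.getD (x, y) 0
        + (if (pvPos bl).contains x ∧ (pvPos bl).contains y
              ∧ (pvPos bl).getD x 0 < (pvPos bl).getD y 0 then (1 : Int) else 0) := by
  rw [pvS2 (fun c => (pvPos bl).getD c 0) x y _ (pvSeq_pairwise bl)]
  congr 1
  by_cases hc : (pvPos bl).contains x ∧ (pvPos bl).contains y
      ∧ (pvPos bl).getD x 0 < (pvPos bl).getD y 0
  · rw [if_pos hc, if_pos ⟨(pvSeq_mem bl x).2 hc.1, (pvSeq_mem bl y).2 hc.2.1, hc.2.2⟩]
  · rw [if_neg hc,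
      if_neg (fun h => hc ⟨(pvSeq_mem bl x).1 h.1, (pvSeq_mem bl y).1 h.2.1, h.2.2⟩)]

-- B's main loop over all ballots
theorem pvB_fold (x y : String) :
    ∀ (bs : List (List String)) (RW : PySem.Dict String Int × PySem.Dict (String × String) Int),
    (bs.foldl
        (fun RW ballot =>
          let pos := pvPos ballot
          pvSeqStep (PySem.List.sorted pos.keys (fun c => pos.getD c 0)) RW.1 RW.2)
        RW).1.getD x 0 = RW.1.getD x 0 + pvR bs x
      ∧ (bs.foldl
          (fun RW ballot =>
            let pos := pvPos ballot
            pvSeqStep (PySem.List.sorted pos.keys (fun c => pos.getD c 0)) RW.1 RW.2)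
          RW).2.getD (x, y) 0 = RW.2.getD (x, y) 0 + pvW bs x y := by
  intro bs
  induction bs with
  | nil => intro RW; constructor <;> simp [pvR, pvW]
  | cons bl bs ih =>
    intro RW
    rw [List.foldl_cons]
    obtain ⟨ih1, ih2⟩ := ih
      (pvSeqStep (PySem.List.sorted (pvPos bl).keys (fun c => (pvPos bl).getD c 0)) RW.1 RW.2)
    constructor
    · rw [ih1]
      have e : (pvSeqStep (PySem.List.sorted (pvPos bl).keys
            (fun c => (pvPos bl).getD c 0)) RW.1 RW.2).1.getD x 0
          = RW.1.getD x 0 + (if (pvPos bl).contains x then (1 : Int) else 0) :=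
        pvBallotR bl x RW.1 RW.2
      rw [e]
      simp [pvR]; ring
    · rw [ih2]
      have e : (pvSeqStep (PySem.List.sorted (pvPos bl).keys
            (fun c => (pvPos bl).getD c 0)) RW.1 RW.2).2.getD (x, y) 0
          = RW.2.getD (x, y) 0
            + (if (pvPos bl).contains x ∧ (pvPos bl).contains y
                  ∧ (pvPos bl).getD x 0 < (pvPos bl).getD y 0 then (1 : Int) else 0) :=
        pvBallotW bl x y RW.1 RW.2
      rw [e]
      simp [pvW]; ring

-- ranked_count's initialisation maps every candidate to 0
theorem pvR0_getD (x : String) :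
    ∀ (l : List String) (d : PySem.Dict String Int),
    (l.foldl (fun d c => d.insert c (0 : Int)) d).getD x 0
      = if x ∈ l then 0 else d.getD x 0 := by
  intro l
  induction l with
  | nil => intro d; simp
  | cons c l ih =>
    intro d
    rw [List.foldl_cons, ih, PySem.Dict.getD_insert]
    by_cases hx : x ∈ l
    · rw [if_pos hx, if_pos (List.mem_cons_of_mem _ hx)]
    · rw [if_neg hx]
      by_cases hxc : x = c
      · rw [if_pos hxc, if_pos (List.mem_cons.2 (Or.inl hxc))]
      · rw [if_neg hxc, if_neg (fun h => hx ((List.mem_cons.1 h).resolve_left hxc))]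

-- per ballot, A's score decomposes as appearance minus reversed co-ranked order
theorem pvScore_sub (bl : List String) {a b : String} (hba : b ≠ a) :
    pvScore (pvPos bl) a b
      = (if (pvPos bl).contains a then (1 : Int) else 0)
        - (if (pvPos bl).contains b ∧ (pvPos bl).contains a
              ∧ (pvPos bl).getD b 0 < (pvPos bl).getD a 0 then (1 : Int) else 0) := by
  unfold pvScore
  by_cases hain : (pvPos bl).contains a
  · rw [if_pos hain, if_pos hain]
    by_cases hbin : (pvPos bl).contains b
    · rw [if_pos hbin]
      by_cases hlt : (pvPos bl).getD a 0 < (pvPos bl).getD b 0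
      · rw [if_pos hlt, if_neg (fun h => absurd hlt (not_lt_of_gt h.2.2))]
        norm_num
      · have hne : (pvPos bl).getD b 0 ≠ (pvPos bl).getD a 0 :=
          fun he => hba (pvPos_inj bl hbin hain he)
        rw [if_neg hlt, if_pos ⟨hbin, hain, lt_of_le_of_ne (not_lt.1 hlt) hne⟩]
        norm_num
    · rw [if_neg hbin, if_neg (fun h => hbin h.1)]
      norm_num
  · rw [if_neg hain, if_neg hain, if_neg (fun h => hain h.2.1)]
    norm_num

theorem pvTally_eq (bs : List (List String)) {a b : String} (hba : b ≠ a) :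
    pvTally bs a b = pvR bs a - pvW bs b a := by
  induction bs with
  | nil => simp [pvTally, pvR, pvW]
  | cons bl bs ih =>
    unfold pvTally pvR pvW at *
    rw [List.map_cons, List.sum_cons, List.map_cons, List.sum_cons,
      List.map_cons, List.sum_cons, ih, pvScore_sub bl hba]
    ring

-- ===== VERDICT (by name: the statement is the Claim_ definition above) =====
theorem compute_pairwise_spec : Claim_equal_compute_pairwise := by
  intro ballots _
  show compute_pairwise ballots = compute_pairwise_alt ballots
  unfold compute_pairwise compute_pairwise_alt
  simp only []
  set cs := PySem.List.sorted (PySem.Set.ofList (ballots.flatMap (fun b => b))) (fun c => c)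
    with hcs
  have hnd : cs.Nodup := by
    rw [hcs]
    exact (PySem.List.sorted_perm _ _ _).symm.nodup (PySem.Set.nodup_ofList _)
  by_cases hlen : cs.length < 2
  · rw [if_pos hlen, if_pos hlen]
  · rw [if_neg hlen, if_neg hlen]
    refine congrArg (Prod.mk cs) ?_
    refine congrArg (fun d : PySem.Dict String (PySem.Dict String Int) =>
      d.items.map (fun p => (p.1, p.2.items))) ?_
    rw [pvTable_canon cs hnd, pvTable_canon cs hnd,
      pvA_ballots cs hnd ballots (fun _ _ => 0)]
    refine pvCanon_congr cs _ _ (fun a ha b hb hba => ?_)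
    rw [if_pos ⟨ha, hb, hba⟩]
    obtain ⟨h1, -⟩ := pvB_fold a b ballots
      ((cs.foldl (fun d c => d.insert c (0 : Int)) PySem.Dict.empty), PySem.Dict.empty)
    obtain ⟨-, h2⟩ := pvB_fold b a ballots
      ((cs.foldl (fun d c => d.insert c (0 : Int)) PySem.Dict.empty), PySem.Dict.empty)
    rw [h1, h2, pvR0_getD, if_pos ha, PySem.Dict.getD_empty, pvTally_eq ballots hba]
    ring
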